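-- pv_equiv track=rewrite | github.com/MrBrantCode/unitest_baseline | mut_generate/mist_train_cf/cf_96213/solution.py | find_the_index
-- ===== SOURCE A (Python) =====
-- def find_the_index(sentence):
--     def caesar_decode(sentence, shift):
--         decoded = ""
--         for char in sentence:
--             if char.isalpha():
--                 ascii_offset = ord('a') if char.islower() else ord('A')
--                 decoded += chr((ord(char) - ascii_offset - shift) % 26 + ascii_offset)
--             else:
--                 decoded += char
--         return decoded
--
--     for shift in range(1, 26):
--         decoded_sentence = caesar_decode(sentence.lower(), shift).lower()
--         index = decoded_sentence.find("the")
--         if index != -1: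
--             return index
--     return -1
-- ===== SOURCE B (Python) =====
-- def find_the_index(sentence):
--     low = sentence.lower()
--     for shift in range(1, 26):
--         pattern = "".join(chr((ord(c) - 97 + shift) % 26 + 97) for c in "the")
--         idx = low.find(pattern)
--         if idx != -1:
--             return idx
--     return -1
-- ===== Notes on version B (the rewrite author's own statement) =====
-- stated objective: faster
-- what changed: Instead of decoding the whole sentence for every shift, B encodes the 3-char pattern 'the' under each shift and does a single substring search on the lowercased sentence (also dropping the redundant second .lower()).
import Mathlib
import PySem

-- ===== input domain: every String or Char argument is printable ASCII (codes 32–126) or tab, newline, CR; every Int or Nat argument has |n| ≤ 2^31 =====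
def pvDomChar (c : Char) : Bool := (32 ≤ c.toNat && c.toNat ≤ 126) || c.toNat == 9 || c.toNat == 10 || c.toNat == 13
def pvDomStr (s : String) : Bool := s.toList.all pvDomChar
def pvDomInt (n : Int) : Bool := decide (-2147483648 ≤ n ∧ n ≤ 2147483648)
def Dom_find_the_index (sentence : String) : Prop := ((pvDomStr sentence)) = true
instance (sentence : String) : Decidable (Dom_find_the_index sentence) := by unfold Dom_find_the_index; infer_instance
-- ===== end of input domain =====

-- B replaces A's per-shift full-sentence decode with a single substring search for the
-- 3-char encoding of "the" under each shift (objective: faster by a constant factor).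

-- ===== PORT A =====
def pvDecodeChar (shift : Int) (c : Char) : Char :=
  if PySem.Chars.isalpha c then
    let off : Int := if PySem.Chars.islower c then 97 else 65
    Char.ofNat ((PySem.Int.mod ((c.toNat : Int) - off - shift) 26 + off)).toNat
  else c

def pvCaesarDecode (s : List Char) (shift : Int) : List Char :=
  s.foldl (fun acc c => acc ++ [pvDecodeChar shift c]) []

def pvGoA (sentence : List Char) : List Int → Int
  | [] => -1
  | shift :: rest =>
    let decoded := PySem.Chars.lower (pvCaesarDecode (PySem.Chars.lower sentence) shift)
    let index := PySem.Chars.find decoded ['t', 'h', 'e']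
    if index ≠ -1 then index else pvGoA sentence rest

def find_the_index (sentence : String) : Int :=
  pvGoA sentence.toList (PySem.List.pyRange 1 26)

-- ===== PORT B =====
def pvEncChar (shift : Int) (c : Char) : Char :=
  Char.ofNat ((PySem.Int.mod ((c.toNat : Int) - 97 + shift) 26 + 97)).toNat

def pvGoB (low : List Char) : List Int → Int
  | [] => -1
  | shift :: rest =>
    let pattern := ['t', 'h', 'e'].map (pvEncChar shift)
    let idx := PySem.Chars.find low pattern
    if idx ≠ -1 then idx else pvGoB low rest

def find_the_index_alt (sentence : String) : Int :=
  pvGoB (PySem.Chars.lower sentence.toList) (PySem.List.pyRange 1 26)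

-- ===== PRECONDITION & SPEC =====
def Spec_find_the_index (sentence : String) (out : Int) : Prop := out = find_the_index_alt sentence
instance (sentence : String) (out : Int) : Decidable (Spec_find_the_index sentence out) := by unfold Spec_find_the_index; infer_instance

-- ===== CLAIM (what is proved, stated in full; the proofs are below) =====
def Claim_equal_find_the_index : Prop := ∀ (sentence : String), Dom_find_the_index sentence → Spec_find_the_index sentence (find_the_index sentence)

-- ===== LEMMAS AND PROOFS =====

theorem pv_char_eq_iff (a b : Char) : a = b ↔ a.toNat = b.toNat := by
  constructor
  · intro h; rw [h]
  · intro h; exact Char.ext (UInt32.toNat_inj.mp h)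

theorem pv_fmod (a : Int) : PySem.Int.mod a 26 = a % 26 := by
  unfold PySem.Int.mod; rw [Int.fmod_eq_emod]; simp

theorem pv_toNat_ofNat (m : Nat) (h : m < 55296) : (Char.ofNat m).toNat = m := by
  rw [Char.toNat_ofNat, if_pos (Or.inl h)]

theorem pv_isupper_iff (c : Char) : PySem.Chars.isupper c = true ↔ 65 ≤ c.toNat ∧ c.toNat ≤ 90 := by
  unfold PySem.Chars.isupper
  simp only [Bool.and_eq_true, decide_eq_true_eq, Char.le_def, UInt32.le_iff_toNat_le]
  have h1 : ('A' : Char).val.toNat = 65 := by decide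
  have h2 : ('Z' : Char).val.toNat = 90 := by decide
  rw [h1, h2]; rfl

theorem pv_islower_iff (c : Char) : PySem.Chars.islower c = true ↔ 97 ≤ c.toNat ∧ c.toNat ≤ 122 := by
  unfold PySem.Chars.islower
  simp only [Bool.and_eq_true, decide_eq_true_eq, Char.le_def, UInt32.le_iff_toNat_le]
  have h1 : ('a' : Char).val.toNat = 97 := by decide
  have h2 : ('z' : Char).val.toNat = 122 := by decide
  rw [h1, h2]; rfl

theorem pv_isupper_eq_false (c : Char) (h : ¬ (65 ≤ c.toNat ∧ c.toNat ≤ 90)) :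
    PySem.Chars.isupper c = false := by
  cases hh : PySem.Chars.isupper c
  · rfl
  · exact absurd ((pv_isupper_iff c).mp hh) h

theorem pv_lowerChar_eq_self (c : Char) (h : PySem.Chars.isupper c = false) :
    PySem.Chars.lowerChar c = c := by
  unfold PySem.Chars.lowerChar
  rw [h]; simp

theorem pv_enc_toNat (shift : Int) (p : Char) :
    (pvEncChar shift p).toNat = (((p.toNat : Int) - 97 + shift) % 26 + 97).toNat := by
  unfold pvEncChar
  rw [pv_fmod, pv_toNat_ofNat _ (by omega)]

theorem pv_decode_eq_map (s : List Char) (shift : Int) :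
    pvCaesarDecode s shift = s.map (pvDecodeChar shift) := by
  unfold pvCaesarDecode
  suffices h : ∀ (acc : List Char), s.foldl (fun acc c => acc ++ [pvDecodeChar shift c]) acc
      = acc ++ s.map (pvDecodeChar shift) by
    simpa using h []
  induction s with
  | nil => intro acc; simp
  | cons c t ih => intro acc; simp [List.foldl, ih]

-- first-occurrence congruence: identical occurrence sets give identical find results
theorem pv_find_congr (s1 s2 p1 p2 : List Char)
    (h : ∀ j : ℕ, p1 <+: s1.drop j ↔ p2 <+: s2.drop j) :
    PySem.Chars.find s1 p1 = PySem.Chars.find s2 p2 := by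
  have key : ∀ (p s : List Char), (p <:+: s) ↔ ∃ j, p <+: s.drop j := by
    intro p s
    rw [← PySem.Chars.isIn_iff_infix, ← PySem.Chars.exists_prefix_drop_iff_isIn]
  have n1 := PySem.Chars.neg_one_le_find s1 p1
  have n2 := PySem.Chars.neg_one_le_find s2 p2
  by_cases e1 : PySem.Chars.find s1 p1 = -1
  · have hni : ¬ p1 <:+: s1 := (PySem.Chars.find_eq_neg_one_iff _ _).mp e1
    have : PySem.Chars.find s2 p2 = -1 := by
      rw [PySem.Chars.find_eq_neg_one_iff]
      intro hinf
      obtain ⟨j, hj⟩ := (key _ _).mp hinf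
      exact hni ((key _ _).mpr ⟨j, (h j).mpr hj⟩)
    rw [e1, this]
  · have ge1 : 0 ≤ PySem.Chars.find s1 p1 := by omega
    obtain ⟨hp1, hmin1⟩ := PySem.Chars.find_spec ge1
    have e2 : PySem.Chars.find s2 p2 ≠ -1 := by
      intro hc
      exact ((PySem.Chars.find_eq_neg_one_iff _ _).mp hc)
        ((key _ _).mpr ⟨_, (h _).mp hp1⟩)
    have ge2 : 0 ≤ PySem.Chars.find s2 p2 := by omega
    obtain ⟨hp2, hmin2⟩ := PySem.Chars.find_spec ge2
    have heq : (PySem.Chars.find s1 p1).toNat = (PySem.Chars.find s2 p2).toNat := by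
      rcases lt_trichotomy (PySem.Chars.find s1 p1).toNat (PySem.Chars.find s2 p2).toNat with hlt | he | hgt
      · exact absurd ((h _).mp hp1) (hmin2 _ hlt)
      · exact he
      · exact absurd ((h _).mpr hp2) (hmin1 _ hgt)
    omega

-- prefix transport through a character map whose fibres over the pattern are singletons
theorem pv_map_prefix_iff (g e : Char → Char) (pat : List Char) :
    ∀ (xs : List Char), (∀ c ∈ xs, ∀ p ∈ pat, (g c = p ↔ c = e p)) →
      (pat <+: xs.map g ↔ pat.map e <+: xs) := by
  induction pat with
  | nil =>
    intro xs _
    simp only [List.map_nil]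
    exact ⟨fun _ => List.nil_prefix, fun _ => List.nil_prefix⟩
  | cons p pt ih =>
    intro xs hx
    cases xs with
    | nil => simp
    | cons x xt =>
      simp only [List.map_cons, List.cons_prefix_cons]
      constructor
      · rintro ⟨h1, h2⟩
        refine ⟨((hx x (by simp) p (by simp)).mp h1.symm).symm, ?_⟩
        exact (ih xt (fun c hc q hq => hx c (by simp [hc]) q (by simp [hq]))).mp h2
      · rintro ⟨h1, h2⟩
        refine ⟨(((hx x (by simp) p (by simp)).mpr h1.symm).symm), ?_⟩
        exact (ih xt (fun c hc q hq => hx c (by simp [hc]) q (by simp [hq]))).mpr h2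

theorem pv_not_upper_lowerChar (c : Char) :
    PySem.Chars.isupper (PySem.Chars.lowerChar c) = false := by
  unfold PySem.Chars.lowerChar
  by_cases h : PySem.Chars.isupper c = true
  · rw [if_pos h]
    have hb := (pv_isupper_iff c).mp h
    apply pv_isupper_eq_false
    rw [pv_toNat_ofNat _ (by omega)]
    omega
  · rw [if_neg h]
    exact eq_false_of_ne_true h

-- the key per-character fibre fact
theorem pv_fibre (shift : Int) (c : Char) (hc : PySem.Chars.isupper c = false)
    (p : Char) (hp : p ∈ (['t', 'h', 'e'] : List Char)) :
    (PySem.Chars.lowerChar (pvDecodeChar shift c) = p ↔ c = pvEncChar shift p) := by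
  have hcu : ¬ (65 ≤ c.toNat ∧ c.toNat ≤ 90) := fun h => by
    rw [(pv_isupper_iff c).mpr h] at hc; exact Bool.true_eq_false.mp hc
  have hpn : 97 ≤ p.toNat ∧ p.toNat ≤ 122 := by
    simp only [List.mem_cons, List.not_mem_nil, or_false] at hp
    rcases hp with rfl | rfl | rfl <;> decide
  rw [pv_char_eq_iff _ p, pv_char_eq_iff c _, pv_enc_toNat]
  by_cases hl : PySem.Chars.islower c = true
  · have hcl := (pv_islower_iff c).mp hl
    have ha : PySem.Chars.isalpha c = true := by
      unfold PySem.Chars.isalpha; rw [hl, Bool.or_true]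
    simp only [pvDecodeChar, ha, hl, if_true]
    rw [pv_fmod]
    have hv : (((c.toNat : Int) - 97 - shift) % 26 + 97).toNat < 55296 := by omega
    rw [pv_lowerChar_eq_self _ (pv_isupper_eq_false _ (by rw [pv_toNat_ofNat _ hv]; omega)),
      pv_toNat_ofNat _ hv]
    omega
  · have hnl : ¬ (97 ≤ c.toNat ∧ c.toNat ≤ 122) := fun h => hl ((pv_islower_iff c).mpr h)
    have ha : PySem.Chars.isalpha c = false := by
      unfold PySem.Chars.isalpha
      rw [hc, eq_false_of_ne_true hl]; rfl
    simp only [pvDecodeChar, ha, Bool.false_eq_true, if_false]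
    rw [pv_lowerChar_eq_self _ hc]
    omega

theorem pv_shift_eq (shift : Int) (low : List Char)
    (hlow : ∀ c ∈ low, PySem.Chars.isupper c = false) :
    PySem.Chars.find (PySem.Chars.lower (pvCaesarDecode low shift)) ['t', 'h', 'e']
      = PySem.Chars.find low (['t', 'h', 'e'].map (pvEncChar shift)) := by
  rw [pv_decode_eq_map]
  have hmm : PySem.Chars.lower (low.map (pvDecodeChar shift))
      = low.map (fun c => PySem.Chars.lowerChar (pvDecodeChar shift c)) := by
    simp [PySem.Chars.lower, List.map_map, Function.comp]
  rw [hmm]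
  apply pv_find_congr
  intro j
  rw [← List.map_drop]
  exact pv_map_prefix_iff _ _ _ (low.drop j)
    (fun c hc p hp => pv_fibre shift c (hlow c (List.drop_subset _ _ hc)) p hp)

theorem pv_go_eq (s : List Char) (shifts : List Int) :
    pvGoA s shifts = pvGoB (PySem.Chars.lower s) shifts := by
  induction shifts with
  | nil => rfl
  | cons shift rest ih =>
    show (let decoded := PySem.Chars.lower (pvCaesarDecode (PySem.Chars.lower s) shift)
          let index := PySem.Chars.find decoded ['t', 'h', 'e']
          if index ≠ -1 then index else pvGoA s rest)
        = (let pattern := ['t', 'h', 'e'].map (pvEncChar shift)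
           let idx := PySem.Chars.find (PySem.Chars.lower s) pattern
           if idx ≠ -1 then idx else pvGoB (PySem.Chars.lower s) rest)
    simp only
    rw [pv_shift_eq shift (PySem.Chars.lower s)
      (fun c hc => by
        simp only [PySem.Chars.lower, List.mem_map] at hc
        obtain ⟨d, _, rfl⟩ := hc
        exact pv_not_upper_lowerChar d)]
    split_ifs with h
    · rfl
    · exact ih

-- ===== VERDICT (by name: the statement is the Claim_ definition above) =====
theorem find_the_index_spec : Claim_equal_find_the_index := by
  intro s _
  unfold Spec_find_the_index find_the_index find_the_index_alt
  exact pv_go_eq s.toList _
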